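-- pv_equiv track=rewrite | github.com/pcs1265/c2r316 | compiler/inline.py | _recursive_set
-- ===== SOURCE A (Python) =====
-- from typing import Dict, List, Optional, Set
--
-- def _recursive_set(call_graph: Dict[str, Set[str]]) -> Set[str]:
--     """Return names of functions involved in any cycle (direct or mutual recursion)."""
--     recursive: Set[str] = set()
--     all_names = set(call_graph.keys())
--
--     def _reachable(start: str, visited: Set[str]) -> Set[str]:
--         out: Set[str] = set()
--         stack = [start]
--         while stack:
--             n = stack.pop()
--             if n in out:
--                 continue
--             out.add(n)
--             for callee in call_graph.get(n, ()):
--                 if callee not in out: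
--                     stack.append(callee)
--         return out
--
--     for name in all_names:
--         if name in _reachable(name, set()) - {name}:
--             recursive.add(name)
--         # also mark if it reaches itself
--         if name in call_graph.get(name, ()):
--             recursive.add(name)
--
--     # simpler: any function that can reach itself
--     for name in all_names:
--         reachable = _reachable(name, set())
--         if name in call_graph.get(name, ()):
--             recursive.add(name)
--         # mutual: if any callee can reach back to name
--         for callee in call_graph.get(name, ()):
--             if name in _reachable(callee, set()):
--                 recursive.add(name)
--                 recursive.add(callee)
--
--     return recursive
-- ===== SOURCE B (Python) =====
-- def _recursive_set(call_graph):
--     """Return names of functions involved in any cycle (direct or mutual recursion)."""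
--
--     def _reach_from(start):
--         # one recursive DFS, computed at most once per distinct callee
--         seen = set()
--
--         def dfs(u):
--             if u in seen:
--                 return
--             seen.add(u)
--             for v in call_graph.get(u, ()):
--                 dfs(v)
--
--         dfs(start)
--         return seen
--
--     # reachability sets, computed once per distinct callee (A recomputes per edge)
--     memo = {}
--     for name in call_graph:
--         for callee in call_graph[name]:
--             if callee not in memo:
--                 memo[callee] = _reach_from(callee)
--
--     recursive = set()
--     for name in call_graph:
--         if name in call_graph[name]:
--             recursive.add(name)
--     for name in call_graph:
--         for callee in call_graph[name]:
--             if name in memo[callee]: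
--                 recursive.add(name)
--                 recursive.add(callee)
--     return recursive
-- ===== Notes on version B (the rewrite author's own statement) =====
-- stated objective: faster
-- what changed: B precomputes each reachability set once per distinct callee into a dict (via a recursive DFS) and drops A's two redundant per-name traversals and its dead first-pass check, so A's stack-DFS-per-edge-and-per-name disappears into single dict lookups.
import Mathlib
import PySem

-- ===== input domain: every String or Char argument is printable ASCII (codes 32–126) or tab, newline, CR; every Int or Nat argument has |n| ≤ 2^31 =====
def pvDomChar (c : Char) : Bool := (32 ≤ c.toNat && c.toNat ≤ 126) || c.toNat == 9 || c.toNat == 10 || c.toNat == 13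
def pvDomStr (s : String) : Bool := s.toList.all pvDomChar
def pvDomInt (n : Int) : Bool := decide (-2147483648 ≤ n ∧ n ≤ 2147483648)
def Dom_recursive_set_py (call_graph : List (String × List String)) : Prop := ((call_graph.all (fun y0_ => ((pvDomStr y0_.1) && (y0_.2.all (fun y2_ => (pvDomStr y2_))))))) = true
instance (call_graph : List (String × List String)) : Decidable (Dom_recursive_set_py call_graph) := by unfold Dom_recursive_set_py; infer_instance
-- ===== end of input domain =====

-- B computes each reachability set once per distinct callee (recursive DFS + memo dict)
-- instead of A's one stack-DFS per edge plus two per name; equivalence of the returned set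
-- (as the insertion-ordered list of the port convention) is proved below.

-- shared accessors for the call-graph argument (a dict str -> set[str])
-- keys of the dict (unique, insertion order)
def pvKeys (call_graph : List (String × List String)) : List String :=
  PySem.Set.ofList (call_graph.map Prod.fst)

-- call_graph.get(n, ()) : first-match lookup, default empty
def pvAdj (call_graph : List (String × List String)) (n : String) : List String :=
  (PySem.Dict.mk call_graph).getD n []

-- every node that can ever appear (keys and callees); used only as a fuel bound
def pvUniv (call_graph : List (String × List String)) : List String :=
  call_graph.map Prod.fst ++ (call_graph.map Prod.snd).flatten

-- ===== PORT A =====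
-- the 'while stack:' loop of _reachable; fuel only makes the recursion structural,
-- it is provably never exhausted (pvPhi bound below)
def reachLoopA (call_graph : List (String × List String)) :
    Nat → List String → PySem.Set String → PySem.Set String
  | 0, _, out => out
  | _ + 1, [], out => out
  | f + 1, n :: st, out =>
    if PySem.Set.contains out n then
      reachLoopA call_graph f st out
    else
      let out' := PySem.Set.add out n
      reachLoopA call_graph f
        (((pvAdj call_graph n).filter (fun c => !(PySem.Set.contains out' c))) ++ st) out'

def fuelA (call_graph : List (String × List String)) : Nat :=
  1 + ((pvUniv call_graph).map (fun m => (pvAdj call_graph m).length + 1)).sum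

-- _reachable(start, set())
def reachableA (call_graph : List (String × List String)) (start : String) : PySem.Set String :=
  reachLoopA call_graph (fuelA call_graph) [start] PySem.Set.empty

def recursive_set_py (call_graph : List (String × List String)) : List String :=
  let all_names := pvKeys call_graph
  -- first loop
  let rec1 := all_names.foldl (fun recs name =>
    let recs :=
      if PySem.Set.contains (PySem.Set.diff (reachableA call_graph name) [name]) name then
        PySem.Set.add recs name
      else recs
    if (pvAdj call_graph name).contains name then PySem.Set.add recs name else recs)
    PySem.Set.empty
  -- second loop
  all_names.foldl (fun recs name =>
    let _reachable := reachableA call_graph name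
    let recs :=
      if (pvAdj call_graph name).contains name then PySem.Set.add recs name else recs
    (pvAdj call_graph name).foldl (fun recs callee =>
      if PySem.Set.contains (reachableA call_graph callee) name then
        PySem.Set.add (PySem.Set.add recs name) callee
      else recs) recs) rec1

-- ===== PORT B =====
-- recursive DFS of Source B (seen-set threaded; fuel only makes it structural)
def dfsB (call_graph : List (String × List String)) :
    Nat → String → PySem.Set String → PySem.Set String
  | 0, _, seen => seen
  | f + 1, u, seen =>
    if PySem.Set.contains seen u then seen
    else (pvAdj call_graph u).foldl (fun acc v => dfsB call_graph f v acc)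
      (PySem.Set.add seen u)

def fuelB (call_graph : List (String × List String)) : Nat :=
  (pvUniv call_graph).length + 1

-- _reach_from(start)
def reachFromB (call_graph : List (String × List String)) (start : String) : PySem.Set String :=
  dfsB call_graph (fuelB call_graph) start PySem.Set.empty

-- memo[callee] = _reach_from(callee), computed once per distinct callee
def memoStepB (call_graph : List (String × List String))
    (memo : PySem.Dict String (List String)) (c : String) : PySem.Dict String (List String) :=
  if memo.contains c then memo else memo.insert c (reachFromB call_graph c)

def memoB (call_graph : List (String × List String)) : PySem.Dict String (List String) :=
  (pvKeys call_graph).foldl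
    (fun memo k => (pvAdj call_graph k).foldl (memoStepB call_graph) memo)
    PySem.Dict.empty

def recursive_set_py_alt (call_graph : List (String × List String)) : List String :=
  let memo := memoB call_graph
  let recs := (pvKeys call_graph).foldl (fun recs name =>
    if (pvAdj call_graph name).contains name then PySem.Set.add recs name else recs)
    PySem.Set.empty
  (pvKeys call_graph).foldl (fun recs name =>
    (pvAdj call_graph name).foldl (fun recs callee =>
      if PySem.Set.contains (memo.getD callee []) name then
        PySem.Set.add (PySem.Set.add recs name) callee
      else recs) recs) recs

-- ===== PRECONDITION & SPEC =====
def Spec_recursive_set_py (call_graph : List (String × List String)) (out : List String) : Prop := out = recursive_set_py_alt call_graph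
instance (call_graph : List (String × List String)) (out : List String) : Decidable (Spec_recursive_set_py call_graph out) := by unfold Spec_recursive_set_py; infer_instance

-- ===== CLAIM (what is proved, stated in full; the proofs are below) =====
def Claim_equal_recursive_set_py : Prop := ∀ (call_graph : List (String × List String)), Dom_recursive_set_py call_graph → Spec_recursive_set_py call_graph (recursive_set_py call_graph)

-- ===== LEMMAS AND PROOFS =====

-- reachability avoiding a forbidden set: a path u → … → x all of whose nodes are outside `out`
inductive pvAvoid (call_graph : List (String × List String)) (out : List String) :
    String → String → Prop
  | refl (u : String) : u ∉ out → pvAvoid call_graph out u u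
  | step (u v x : String) : u ∉ out → v ∈ pvAdj call_graph u →
      pvAvoid call_graph out v x → pvAvoid call_graph out u x

theorem pvAvoid_not_mem {cg : List (String × List String)} {out : List String} {u x : String}
    (h : pvAvoid cg out u x) : u ∉ out := by cases h <;> assumption

theorem pvAvoid_anti {cg : List (String × List String)} {out out' : List String} {u x : String}
    (hsub : ∀ m, m ∈ out → m ∈ out') (h : pvAvoid cg out' u x) : pvAvoid cg out u x := by
  induction h with
  | refl u hu => exact .refl u (fun hm => hu (hsub _ hm))
  | step u v x hu hv _ ih => exact .step u v x (fun hm => hu (hsub _ hm)) hv ih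

theorem pvAvoid_trans {cg : List (String × List String)} {out : List String} {a b c : String}
    (h1 : pvAvoid cg out a b) (h2 : pvAvoid cg out b c) : pvAvoid cg out a c := by
  induction h1 with
  | refl => exact h2
  | step u v x hu hv _ ih => exact .step u v c hu hv (ih h2)

theorem pvAvoid_add {cg : List (String × List String)} {out : List String} {u x : String}
    (n : String) (h : pvAvoid cg out u x) :
    pvAvoid cg (PySem.Set.add out n) u x ∨ x = n ∨
      ∃ v ∈ pvAdj cg n, pvAvoid cg (PySem.Set.add out n) v x := by
  induction h with
  | refl u hu =>
    by_cases hun : u = n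
    · exact Or.inr (Or.inl hun)
    · exact Or.inl (.refl u (by
        intro hm
        rcases (PySem.Set.mem_add _ _ _).1 hm with h' | h'
        · exact hu h'
        · exact hun h'))
  | step u v x hu hv hvx ih =>
    rcases ih with h' | h' | h'
    · by_cases hun : u = n
      · subst hun
        exact Or.inr (Or.inr ⟨v, hv, h'⟩)
      · exact Or.inl (.step u v x (by
          intro hm
          rcases (PySem.Set.mem_add _ _ _).1 hm with h'' | h''
          · exact hu h''
          · exact hun h'') hv h')
    · exact Or.inr (Or.inl h')
    · exact Or.inr (Or.inr h')

theorem get?_mk_mem {cg : List (String × List String)} {n : String} {l : List String}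
    (h : (PySem.Dict.mk cg).get? n = some l) : l ∈ cg.map Prod.snd := by
  induction cg with
  | nil => simp [PySem.Dict.get?] at h
  | cons p rest ih =>
    rcases p with ⟨k, v⟩
    rw [PySem.Dict.get?_mk_cons] at h
    by_cases hk : k == n
    · simp [hk] at h
      subst h; exact List.mem_cons_self
    · simp [hk] at h
      exact List.mem_cons_of_mem _ (ih h)

theorem adj_sub_univ {cg : List (String × List String)} {n v : String}
    (h : v ∈ pvAdj cg n) : v ∈ pvUniv cg := by
  unfold pvAdj at h
  rw [PySem.Dict.getD_eq_get?_getD] at h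
  cases hg : (PySem.Dict.mk cg).get? n with
  | none => rw [hg] at h; simp at h
  | some l =>
    rw [hg] at h; simp at h
    exact List.mem_append_right _ (List.mem_flatten.mpr ⟨l, get?_mk_mem hg, h⟩)

-- ---- A-side: the stack loop computes exactly avoid-reachability ----

def pvPhi (cg : List (String × List String)) (st out : List String) : Nat :=
  st.length +
    (((pvUniv cg).filter (fun m => decide (¬ m ∈ out))).map
      (fun m => (pvAdj cg m).length + 1)).sum

theorem sum_map_filter_le (l : List String) (q : String → Bool) (g : String → Nat) :
    ((l.filter q).map g).sum ≤ (l.map g).sum := by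
  induction l with
  | nil => simp
  | cons a l ih =>
    by_cases hq : q a
    · simp [hq]; omega
    · simp [hq]; omega

theorem sum_remove_le {l : List String} {n : String} (g : String → Nat) (hn : n ∈ l) :
    ((l.filter (fun m => !(m == n))).map g).sum + g n ≤ (l.map g).sum := by
  induction l with
  | nil => simp at hn
  | cons a l ih =>
    by_cases ha : a = n
    · subst ha
      simp only [List.filter_cons, beq_self_eq_true, Bool.not_true, Bool.false_eq_true,
        if_false, List.map_cons, List.sum_cons]
      have := sum_map_filter_le l (fun m => !(m == a)) g
      omega
    · have hb : (a == n) = false := beq_false_of_ne ha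
      rcases List.mem_cons.1 hn with h' | h'
      · exact absurd h'.symm ha
      · simp only [List.filter_cons, hb, Bool.not_false, if_true, List.map_cons, List.sum_cons]
        have := ih h'
        omega

theorem loopA_mem (cg : List (String × List String)) :
    ∀ (f : Nat) (st : List String) (out : PySem.Set String),
      (∀ s ∈ st, s ∈ pvUniv cg) → pvPhi cg st out ≤ f →
      ∀ x, x ∈ reachLoopA cg f st out ↔ x ∈ out ∨ ∃ s ∈ st, pvAvoid cg out s x := by
  intro f
  induction f with
  | zero =>
    intro st out hst hphi x
    have hnil : st = [] := by
      cases st with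
      | nil => rfl
      | cons a l => unfold pvPhi at hphi; simp at hphi
    subst hnil
    simp [reachLoopA]
  | succ f ih =>
    intro st out hst hphi x
    cases st with
    | nil => simp [reachLoopA]
    | cons n st =>
      by_cases hn : n ∈ out
      · have hc : PySem.Set.contains out n = true := (PySem.Set.contains_iff _ _).2 hn
        rw [show reachLoopA cg (f+1) (n::st) out = reachLoopA cg f st out by
          simp only [reachLoopA, hc, if_true]]
        have hphi' : pvPhi cg st out ≤ f := by
          unfold pvPhi at hphi ⊢
          simp only [List.length_cons] at hphi
          omega
        rw [ih st out (fun s hs => hst s (List.mem_cons_of_mem _ hs)) hphi' x]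
        constructor
        · rintro (hx | ⟨s, hs, h⟩)
          · exact Or.inl hx
          · exact Or.inr ⟨s, List.mem_cons_of_mem _ hs, h⟩
        · rintro (hx | ⟨s, hs, h⟩)
          · exact Or.inl hx
          · rcases List.mem_cons.1 hs with rfl | hs'
            · exact absurd hn (pvAvoid_not_mem h)
            · exact Or.inr ⟨s, hs', h⟩
      · have hc : PySem.Set.contains out n = false := by
          rcases hb : PySem.Set.contains out n
          · rfl
          · exact absurd ((PySem.Set.contains_iff _ _).1 hb) hn
        rw [show reachLoopA cg (f+1) (n::st) out
            = reachLoopA cg f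
              (((pvAdj cg n).filter (fun c => !(PySem.Set.contains (PySem.Set.add out n) c))) ++ st)
              (PySem.Set.add out n) by
          simp only [reachLoopA, hc, Bool.false_eq_true, if_false]]
        have hnu : n ∈ pvUniv cg := hst n List.mem_cons_self
        have hsub : ∀ m, m ∈ out → m ∈ PySem.Set.add out n :=
          fun m hm => (PySem.Set.mem_add _ _ _).2 (Or.inl hm)
        have hst' : ∀ s ∈ ((pvAdj cg n).filter
            (fun c => !(PySem.Set.contains (PySem.Set.add out n) c))) ++ st, s ∈ pvUniv cg := by
          intro s hs
          rcases List.mem_append.1 hs with hs' | hs'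
          · exact adj_sub_univ (List.mem_filter.1 hs').1
          · exact hst s (List.mem_cons_of_mem _ hs')
        have hphi' : pvPhi cg
            (((pvAdj cg n).filter (fun c => !(PySem.Set.contains (PySem.Set.add out n) c))) ++ st)
            (PySem.Set.add out n) ≤ f := by
          unfold pvPhi at hphi ⊢
          have hfe : (pvUniv cg).filter (fun m => decide (¬ m ∈ PySem.Set.add out n))
              = ((pvUniv cg).filter (fun m => decide (¬ m ∈ out))).filter (fun m => !(m == n)) := by
            rw [List.filter_filter]
            apply List.filter_congr
            intro a _
            by_cases h1 : a ∈ out <;> by_cases h2 : a = n <;>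
              simp [PySem.Set.mem_add, h1, h2]
          rw [hfe]
          have hmemf : n ∈ (pvUniv cg).filter (fun m => decide (¬ m ∈ out)) :=
            List.mem_filter.2 ⟨hnu, by simpa using hn⟩
          have hsum := sum_remove_le (l := (pvUniv cg).filter (fun m => decide (¬ m ∈ out)))
            (fun m => (pvAdj cg m).length + 1) hmemf
          have hlen := List.length_filter_le
            (fun c => !(PySem.Set.contains (PySem.Set.add out n) c)) (pvAdj cg n)
          have he : ((fun m => (pvAdj cg m).length + 1) n) = (pvAdj cg n).length + 1 := rfl
          rw [he] at hsum
          simp only [List.length_append, List.length_cons] at hphi ⊢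
          omega
        rw [ih _ _ hst' hphi' x]
        constructor
        · rintro (hx | ⟨s, hs, h⟩)
          · rcases (PySem.Set.mem_add _ _ _).1 hx with hx' | hx'
            · exact Or.inl hx'
            · exact Or.inr ⟨n, List.mem_cons_self, by rw [hx']; exact .refl n hn⟩
          · have h0 : pvAvoid cg out s x := pvAvoid_anti hsub h
            rcases List.mem_append.1 hs with hs' | hs'
            · exact Or.inr ⟨n, List.mem_cons_self,
                .step n s x hn (List.mem_filter.1 hs').1 h0⟩
            · exact Or.inr ⟨s, List.mem_cons_of_mem _ hs', h0⟩
        · rintro (hx | ⟨s, hs, h⟩)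
          · exact Or.inl (hsub x hx)
          · rcases pvAvoid_add n h with h' | h' | h'
            · rcases List.mem_cons.1 hs with rfl | hs'
              · exact absurd ((PySem.Set.mem_add _ _ _).2 (Or.inr rfl)) (pvAvoid_not_mem h')
              · exact Or.inr ⟨s, List.mem_append_right _ hs', h'⟩
            · exact Or.inl ((PySem.Set.mem_add _ _ _).2 (Or.inr h'))
            · rcases h' with ⟨v, hv, h'⟩
              have hvno : v ∉ PySem.Set.add out n := pvAvoid_not_mem h'
              have hvf : v ∈ (pvAdj cg n).filter
                  (fun c => !(PySem.Set.contains (PySem.Set.add out n) c)) := by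
                apply List.mem_filter.2
                refine ⟨hv, ?_⟩
                simpa [PySem.Set.mem_add, not_or] using hvno
              exact Or.inr ⟨v, List.mem_append_left _ hvf, h'⟩

theorem reachableA_mem {cg : List (String × List String)} {start x : String}
    (hs : start ∈ pvUniv cg) :
    x ∈ reachableA cg start ↔ pvAvoid cg [] start x := by
  unfold reachableA
  rw [loopA_mem cg (fuelA cg) [start] PySem.Set.empty
    (fun s hsm => by rcases List.mem_cons.1 hsm with rfl | h; exacts [hs, absurd h (by simp)])
    (by
      unfold pvPhi fuelA
      have : (pvUniv cg).filter (fun m => decide (¬ m ∈ (PySem.Set.empty : PySem.Set String)))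
          = pvUniv cg := by
        apply List.filter_eq_self.2
        intro a _
        simp [PySem.Set.empty]
      rw [this]
      simp) x]
  constructor
  · rintro (hx | ⟨s, hs, h⟩)
    · simp [PySem.Set.empty] at hx
    · rcases List.mem_cons.1 hs with rfl | hs'
      · exact h
      · simp at hs'
  · intro h
    exact Or.inr ⟨start, List.mem_cons_self, h⟩

-- ---- B-side: the recursive DFS computes exactly avoid-reachability ----

theorem dfsB_superset (cg : List (String × List String)) :
    ∀ (f : Nat) (u : String) (seen : PySem.Set String) (x : String),
      x ∈ seen → x ∈ dfsB cg f u seen := by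
  intro f
  induction f with
  | zero => intro u seen x hx; exact hx
  | succ f ih =>
    intro u seen x hx
    have aux : ∀ (l : List String) (s : PySem.Set String), x ∈ s →
        x ∈ l.foldl (fun acc v => dfsB cg f v acc) s := by
      intro l
      induction l with
      | nil => intro s hs; exact hs
      | cons v l ihl => intro s hs; exact ihl _ (ih v s x hs)
    show x ∈ (if PySem.Set.contains seen u then seen
      else (pvAdj cg u).foldl (fun acc v => dfsB cg f v acc) (PySem.Set.add seen u))
    split
    · exact hx
    · exact aux _ _ ((PySem.Set.mem_add _ _ _).2 (Or.inl hx))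

def unvisited (cg : List (String × List String)) (seen : List String) : Nat :=
  ((pvUniv cg).filter (fun m => decide (¬ m ∈ seen))).length

theorem unvisited_anti {cg : List (String × List String)} {s s' : List String}
    (h : ∀ m ∈ s, m ∈ s') : unvisited cg s' ≤ unvisited cg s := by
  unfold unvisited
  induction (pvUniv cg) with
  | nil => simp
  | cons a l ih =>
    simp only [List.filter_cons]
    by_cases h1 : a ∈ s
    · have d1 : decide (¬ a ∈ s) = false := by simp [h1]
      have d2 : decide (¬ a ∈ s') = false := by simp [h a h1]
      rw [d1, d2]
      simpa using ih
    · have d1 : decide (¬ a ∈ s) = true := by simp [h1]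
      rw [d1]
      by_cases h2 : a ∈ s'
      · have d2 : decide (¬ a ∈ s') = false := by simp [h2]
        rw [d2]
        simp only [Bool.false_eq_true, if_false, if_true, List.length_cons]
        omega
      · have d2 : decide (¬ a ∈ s') = true := by simp [h2]
        rw [d2]
        simp only [if_true, List.length_cons]
        omega

theorem unvisited_add_lt {cg : List (String × List String)} {u : String} {seen : List String}
    (hu : u ∈ pvUniv cg) (h : u ∉ seen) :
    unvisited cg (PySem.Set.add seen u) < unvisited cg seen := by
  unfold unvisited
  have hmem : u ∈ (pvUniv cg).filter (fun m => decide (¬ m ∈ seen)) :=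
    List.mem_filter.2 ⟨hu, by simpa using h⟩
  have hfe : (pvUniv cg).filter (fun m => decide (¬ m ∈ PySem.Set.add seen u))
      = ((pvUniv cg).filter (fun m => decide (¬ m ∈ seen))).filter (fun m => !(m == u)) := by
    rw [List.filter_filter]
    apply List.filter_congr
    intro a _
    by_cases h1 : a ∈ seen <;> by_cases h2 : a = u <;>
      simp [PySem.Set.mem_add, h1, h2]
  rw [hfe]
  generalize hl : (pvUniv cg).filter (fun m => decide (¬ m ∈ seen)) = l at hmem
  clear hfe hl
  induction l with
  | nil => simp at hmem
  | cons a l ih =>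
    by_cases ha : a = u
    · subst ha
      simp only [List.filter_cons, beq_self_eq_true, Bool.not_true, Bool.false_eq_true, if_false]
      have := List.length_filter_le (fun m => !(m == a)) l
      simp only [List.length_cons]
      omega
    · have hb : (a == u) = false := beq_false_of_ne ha
      have hm : u ∈ l := by
        rcases List.mem_cons.1 hmem with h' | h'
        · exact absurd h'.symm ha
        · exact h'
      simp only [List.filter_cons, hb, Bool.not_false, if_true, List.length_cons]
      have := ih hm
      omega

theorem pvAvoid_extend {cg : List (String × List String)} {s' S : List String} {v w x : String}
    (hS : ∀ y, y ∈ S ↔ y ∈ s' ∨ pvAvoid cg s' v y)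
    (h : pvAvoid cg s' w x) : x ∈ S ∨ pvAvoid cg S w x := by
  induction h with
  | refl w hw =>
    by_cases hwS : w ∈ S
    · exact Or.inl hwS
    · exact Or.inr (.refl w hwS)
  | step w z x hw hz hzx ih =>
    by_cases hwS : w ∈ S
    · rcases (hS w).1 hwS with h' | h'
      · exact absurd h' hw
      · exact Or.inl ((hS x).2 (Or.inr (pvAvoid_trans h' (.step w z x hw hz hzx))))
    · rcases ih with h' | h'
      · exact Or.inl h'
      · exact Or.inr (.step w z x hwS hz h')

theorem dfsB_mem (cg : List (String × List String)) :
    ∀ (f : Nat) (u : String) (seen : PySem.Set String),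
      u ∈ pvUniv cg → unvisited cg seen < f →
      ∀ x, x ∈ dfsB cg f u seen ↔ x ∈ seen ∨ pvAvoid cg seen u x := by
  intro f
  induction f with
  | zero => intro u seen hu hlt; exact absurd hlt (Nat.not_lt_zero _)
  | succ f ih =>
    intro u seen hu hlt x
    by_cases hus : u ∈ seen
    · have hc : PySem.Set.contains seen u = true := (PySem.Set.contains_iff _ _).2 hus
      rw [show dfsB cg (f+1) u seen = seen by simp only [dfsB, hc, if_true]]
      constructor
      · exact fun h => Or.inl h
      · rintro (h | h)
        · exact h
        · exact absurd hus (pvAvoid_not_mem h)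
    · have hc : PySem.Set.contains seen u = false := by
        rcases hb : PySem.Set.contains seen u
        · rfl
        · exact absurd ((PySem.Set.contains_iff _ _).1 hb) hus
      rw [show dfsB cg (f+1) u seen
          = (pvAdj cg u).foldl (fun acc v => dfsB cg f v acc) (PySem.Set.add seen u) by
        simp only [dfsB, hc, Bool.false_eq_true, if_false]]
      have hsub0 : ∀ m, m ∈ seen → m ∈ PySem.Set.add seen u :=
        fun m hm => (PySem.Set.mem_add _ _ _).2 (Or.inl hm)
      have hlt0 : unvisited cg (PySem.Set.add seen u) < f := by
        have := unvisited_add_lt hu hus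
        omega
      have aux : ∀ (vs : List String), (∀ v ∈ vs, v ∈ pvUniv cg) →
          ∀ (s' : PySem.Set String), unvisited cg s' < f →
          ∀ y, y ∈ vs.foldl (fun acc v => dfsB cg f v acc) s' ↔
            y ∈ s' ∨ ∃ v ∈ vs, pvAvoid cg s' v y := by
        intro vs
        induction vs with
        | nil => intro _ s' _ y; simp
        | cons v vs ihv =>
          intro hvs s' hlt' y
          simp only [List.foldl_cons]
          have hS : ∀ z, z ∈ dfsB cg f v s' ↔ z ∈ s' ∨ pvAvoid cg s' v z :=
            ih v s' (hvs v List.mem_cons_self) hlt'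
          have hsub : ∀ m ∈ s', m ∈ dfsB cg f v s' :=
            fun m hm => dfsB_superset cg f v s' m hm
          have hlt'' : unvisited cg (dfsB cg f v s') < f :=
            lt_of_le_of_lt (unvisited_anti hsub) hlt'
          rw [ihv (fun w hw => hvs w (List.mem_cons_of_mem _ hw)) _ hlt'' y]
          constructor
          · rintro (hy | ⟨w, hw, h⟩)
            · rcases (hS y).1 hy with h | h
              · exact Or.inl h
              · exact Or.inr ⟨v, List.mem_cons_self, h⟩
            · exact Or.inr ⟨w, List.mem_cons_of_mem _ hw, pvAvoid_anti hsub h⟩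
          · rintro (hy | ⟨w, hw, h⟩)
            · exact Or.inl (hsub _ hy)
            · rcases List.mem_cons.1 hw with rfl | hw'
              · exact Or.inl ((hS y).2 (Or.inr h))
              · rcases pvAvoid_extend hS h with h' | h'
                · exact Or.inl h'
                · exact Or.inr ⟨w, hw', h'⟩
      rw [aux (pvAdj cg u) (fun v hv => adj_sub_univ hv) (PySem.Set.add seen u) hlt0 x]
      constructor
      · rintro (hx | ⟨v, hv, h⟩)
        · rcases (PySem.Set.mem_add _ _ _).1 hx with hx' | hx'
          · exact Or.inl hx'
          · exact Or.inr (by rw [hx']; exact .refl u hus)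
        · exact Or.inr (.step u v x hus hv (pvAvoid_anti hsub0 h))
      · rintro (hx | h)
        · exact Or.inl ((PySem.Set.mem_add _ _ _).2 (Or.inl hx))
        · rcases pvAvoid_add u h with h' | h' | h'
          · exact absurd ((PySem.Set.mem_add _ _ _).2 (Or.inr rfl)) (pvAvoid_not_mem h')
          · exact Or.inl ((PySem.Set.mem_add _ _ _).2 (Or.inr h'))
          · rcases h' with ⟨v, hv, h'⟩
            exact Or.inr ⟨v, hv, h'⟩

theorem reachFromB_mem {cg : List (String × List String)} {u x : String}
    (hu : u ∈ pvUniv cg) :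
    x ∈ reachFromB cg u ↔ pvAvoid cg [] u x := by
  unfold reachFromB
  rw [dfsB_mem cg (fuelB cg) u PySem.Set.empty hu
    (by
      unfold unvisited fuelB
      have := List.length_filter_le
        (fun m => decide (¬ m ∈ (PySem.Set.empty : PySem.Set String))) (pvUniv cg)
      omega) x]
  constructor
  · rintro (hx | h)
    · simp [PySem.Set.empty] at hx
    · exact h
  · exact fun h => Or.inr h

-- the two reachability computations decide the same membership
theorem contains_reach_eq {cg : List (String × List String)} {c k : String}
    (hc : c ∈ pvUniv cg) :
    PySem.Set.contains (reachableA cg c) k = PySem.Set.contains (reachFromB cg c) k := by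
  rcases h1 : PySem.Set.contains (reachableA cg c) k <;>
    rcases h2 : PySem.Set.contains (reachFromB cg c) k
  · rfl
  · exact absurd ((reachableA_mem hc).2 ((reachFromB_mem hc).1
      ((PySem.Set.contains_iff _ _).1 h2)))
      (fun hm => by rw [(PySem.Set.contains_iff _ _).2 hm] at h1; cases h1)
  · exact absurd ((reachFromB_mem hc).2 ((reachableA_mem hc).1
      ((PySem.Set.contains_iff _ _).1 h1)))
      (fun hm => by rw [(PySem.Set.contains_iff _ _).2 hm] at h2; cases h2)
  · rfl

-- ---- memo lemmas ----

theorem memo_good (cg : List (String × List String)) :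
    ∀ (l : List String) (m : PySem.Dict String (List String)),
      (∀ c, m.contains c = true → m.getD c [] = reachFromB cg c) →
      ∀ c, (l.foldl (memoStepB cg) m).contains c = true →
        (l.foldl (memoStepB cg) m).getD c [] = reachFromB cg c := by
  intro l
  induction l with
  | nil => intro m hm; exact hm
  | cons a l ih =>
    intro m hm
    simp only [List.foldl_cons]
    apply ih
    intro c hc
    unfold memoStepB
    unfold memoStepB at hc
    split at hc <;> split
    · exact hm c hc
    · exact hm c hc
    · rename_i h1 h2; exact absurd h2 h1
    · rw [PySem.Dict.getD_insert]
      rw [PySem.Dict.contains_insert] at hc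
      by_cases hca : c = a
      · subst hca; simp
      · have : (c == a) = false := beq_false_of_ne hca
        rw [this] at hc
        simp only [Bool.false_or] at hc
        rw [if_neg hca]
        exact hm c hc

theorem memo_contains_mono (cg : List (String × List String)) :
    ∀ (l : List String) (m : PySem.Dict String (List String)) (c : String),
      m.contains c = true → (l.foldl (memoStepB cg) m).contains c = true := by
  intro l
  induction l with
  | nil => intro m c h; exact h
  | cons a l ih =>
    intro m c h
    simp only [List.foldl_cons]
    apply ih
    unfold memoStepB
    split
    · exact h
    · rw [PySem.Dict.contains_insert, h, Bool.or_true]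

theorem memo_covers (cg : List (String × List String)) :
    ∀ (l : List String) (m : PySem.Dict String (List String)) (c : String),
      c ∈ l → (l.foldl (memoStepB cg) m).contains c = true := by
  intro l
  induction l with
  | nil => intro m c h; simp at h
  | cons a l ih =>
    intro m c h
    simp only [List.foldl_cons]
    rcases List.mem_cons.1 h with h' | h'
    · subst h'
      apply memo_contains_mono
      unfold memoStepB
      split
      · assumption
      · exact PySem.Dict.contains_insert_self _ _ _
    · exact ih _ _ h'

theorem memoB_getD {cg : List (String × List String)} {k c : String}
    (hk : k ∈ pvKeys cg) (hc : c ∈ pvAdj cg k) :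
    (memoB cg).getD c [] = reachFromB cg c := by
  have hrows_good : ∀ (ks : List String) (m : PySem.Dict String (List String)),
      (∀ c', m.contains c' = true → m.getD c' [] = reachFromB cg c') →
      ∀ c', (ks.foldl (fun memo k => (pvAdj cg k).foldl (memoStepB cg) memo) m).contains c' = true →
        (ks.foldl (fun memo k => (pvAdj cg k).foldl (memoStepB cg) memo) m).getD c' [] = reachFromB cg c' := by
    intro ks
    induction ks with
    | nil => intro m hm; exact hm
    | cons a ks ih =>
      intro m hm
      simp only [List.foldl_cons]
      exact ih _ (memo_good cg _ _ hm)
  have hrows_mono : ∀ (ks : List String) (m : PySem.Dict String (List String)) (c' : String),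
      m.contains c' = true →
      (ks.foldl (fun memo k => (pvAdj cg k).foldl (memoStepB cg) memo) m).contains c' = true := by
    intro ks
    induction ks with
    | nil => intro m c' h; exact h
    | cons a ks ih =>
      intro m c' h
      simp only [List.foldl_cons]
      exact ih _ _ (memo_contains_mono cg _ _ _ h)
  have hcov : ∀ (ks : List String) (m : PySem.Dict String (List String)),
      k ∈ ks →
      (ks.foldl (fun memo k => (pvAdj cg k).foldl (memoStepB cg) memo) m).contains c = true := by
    intro ks
    induction ks with
    | nil => intro m h; simp at h
    | cons a ks ih =>
      intro m h
      simp only [List.foldl_cons]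
      rcases List.mem_cons.1 h with h' | h'
      · subst h'
        exact hrows_mono _ _ _ (memo_covers cg _ _ _ hc)
      · exact ih _ h'
  have hgood0 : ∀ c', (PySem.Dict.empty : PySem.Dict String (List String)).contains c' = true →
      (PySem.Dict.empty : PySem.Dict String (List String)).getD c' [] = reachFromB cg c' := by
    intro c' h
    rw [PySem.Dict.contains_empty] at h
    exact absurd h (by simp)
  exact hrows_good _ _ hgood0 _ (hcov _ _ hk)

-- ---- assembling the two passes ----

theorem pass1_eq (cg : List (String × List String)) (recs : PySem.Set String) :
    (pvKeys cg).foldl (fun recs name =>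
      let recs :=
        if PySem.Set.contains (PySem.Set.diff (reachableA cg name) [name]) name then
          PySem.Set.add recs name
        else recs
      if (pvAdj cg name).contains name then PySem.Set.add recs name else recs) recs
    = (pvKeys cg).foldl (fun recs name =>
        if (pvAdj cg name).contains name then PySem.Set.add recs name else recs) recs := by
  apply PySem.List.foldl_congr_mem
  intro acc name _
  have hdead : PySem.Set.contains (PySem.Set.diff (reachableA cg name) [name]) name = false := by
    rcases hb : PySem.Set.contains (PySem.Set.diff (reachableA cg name) [name]) name
    · rfl
    · have := (PySem.Set.mem_diff _ _ _).1 ((PySem.Set.contains_iff _ _).1 hb)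
      simp at this
  rw [hdead]
  simp only [Bool.false_eq_true, if_false]

theorem pass1_adds (cg : List (String × List String)) :
    ∀ (names : List String) (recs : PySem.Set String) (m : String),
      m ∈ names → m ∈ pvAdj cg m →
      m ∈ names.foldl (fun recs name =>
        if (pvAdj cg name).contains name then PySem.Set.add recs name else recs) recs := by
  intro names
  induction names with
  | nil => intro recs m h _; simp at h
  | cons a names ih =>
    intro recs m hm hself
    simp only [List.foldl_cons]
    rcases List.mem_cons.1 hm with rfl | hm'
    · have hmono : ∀ (l : List String) (r : PySem.Set String) (x : String), x ∈ r →
          x ∈ l.foldl (fun recs name =>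
            if (pvAdj cg name).contains name then PySem.Set.add recs name else recs) r := by
        intro l
        induction l with
        | nil => intro r x hx; exact hx
        | cons b l ihl =>
          intro r x hx
          simp only [List.foldl_cons]
          apply ihl
          split
          · exact (PySem.Set.mem_add _ _ _).2 (Or.inl hx)
          · exact hx
      apply hmono
      have hcond : (pvAdj cg m).contains m = true := by simpa using hself
      simp only [hcond, if_true]
      exact (PySem.Set.mem_add _ _ _).2 (Or.inr rfl)
    · exact ih _ m hm' hself

theorem pass2_mono (cg : List (String × List String)) :
    ∀ (l : List String) (recs : PySem.Set String) (x : String), x ∈ recs →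
      x ∈ l.foldl (fun recs callee =>
        if PySem.Set.contains ((memoB cg).getD callee []) name then
          PySem.Set.add (PySem.Set.add recs name) callee
        else recs) recs := by
  intro l
  induction l with
  | nil => intro recs x hx; exact hx
  | cons c l ih =>
    intro recs x hx
    simp only [List.foldl_cons]
    apply ih
    split
    · exact (PySem.Set.mem_add _ _ _).2 (Or.inl ((PySem.Set.mem_add _ _ _).2 (Or.inl hx)))
    · exact hx

theorem pass2_eq (cg : List (String × List String)) :
    ∀ (names : List String) (recs : PySem.Set String),
      (∀ m ∈ names, m ∈ pvKeys cg) →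
      (∀ m ∈ names, m ∈ pvAdj cg m → m ∈ recs) →
      names.foldl (fun recs name =>
        let _reachable := reachableA cg name
        let recs :=
          if (pvAdj cg name).contains name then PySem.Set.add recs name else recs
        (pvAdj cg name).foldl (fun recs callee =>
          if PySem.Set.contains (reachableA cg callee) name then
            PySem.Set.add (PySem.Set.add recs name) callee
          else recs) recs) recs
      = names.foldl (fun recs name =>
          (pvAdj cg name).foldl (fun recs callee =>
            if PySem.Set.contains ((memoB cg).getD callee []) name then
              PySem.Set.add (PySem.Set.add recs name) callee
            else recs) recs) recs := by
  intro names
  induction names with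
  | nil => intro recs _ _; rfl
  | cons name names ih =>
    intro recs hkeys hinv
    simp only [List.foldl_cons]
    have hname : name ∈ pvKeys cg := hkeys _ List.mem_cons_self
    have hself : (if (pvAdj cg name).contains name then PySem.Set.add recs name else recs)
        = recs := by
      split
      · rename_i hcond
        exact PySem.Set.add_of_mem
          (hinv name List.mem_cons_self (by simpa using hcond))
      · rfl
    have hinner : (pvAdj cg name).foldl (fun recs callee =>
          if PySem.Set.contains (reachableA cg callee) name then
            PySem.Set.add (PySem.Set.add recs name) callee
          else recs) recs
        = (pvAdj cg name).foldl (fun recs callee =>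
            if PySem.Set.contains ((memoB cg).getD callee []) name then
              PySem.Set.add (PySem.Set.add recs name) callee
            else recs) recs := by
      apply PySem.List.foldl_congr_mem
      intro acc callee hcallee
      rw [memoB_getD hname hcallee, contains_reach_eq (adj_sub_univ hcallee)]
    have hstep : (let _reachable := reachableA cg name
        let recs := if (pvAdj cg name).contains name then PySem.Set.add recs name else recs
        (pvAdj cg name).foldl (fun recs callee =>
          if PySem.Set.contains (reachableA cg callee) name then
            PySem.Set.add (PySem.Set.add recs name) callee
          else recs) recs)
        = (pvAdj cg name).foldl (fun recs callee =>
            if PySem.Set.contains ((memoB cg).getD callee []) name then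
              PySem.Set.add (PySem.Set.add recs name) callee
            else recs) recs := by
      show ((pvAdj cg name).foldl (fun recs callee =>
          if PySem.Set.contains (reachableA cg callee) name then
            PySem.Set.add (PySem.Set.add recs name) callee
          else recs)
          (if (pvAdj cg name).contains name then PySem.Set.add recs name else recs)) = _
      rw [hself, hinner]
    rw [hstep]
    apply ih
    · exact fun m hm => hkeys m (List.mem_cons_of_mem _ hm)
    · intro m hm hselfm
      exact pass2_mono cg _ _ _ (hinv m (List.mem_cons_of_mem _ hm) hselfm)

-- ===== VERDICT (by name: the statement is the Claim_ definition above) =====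
theorem recursive_set_py_spec : Claim_equal_recursive_set_py := by
  intro cg _
  unfold Spec_recursive_set_py
  show ((pvKeys cg).foldl (fun recs name =>
      let _reachable := reachableA cg name
      let recs := if (pvAdj cg name).contains name then PySem.Set.add recs name else recs
      (pvAdj cg name).foldl (fun recs callee =>
        if PySem.Set.contains (reachableA cg callee) name then
          PySem.Set.add (PySem.Set.add recs name) callee
        else recs) recs)
      ((pvKeys cg).foldl (fun recs name =>
        let recs :=
          if PySem.Set.contains (PySem.Set.diff (reachableA cg name) [name]) name then
            PySem.Set.add recs name
          else recs
        if (pvAdj cg name).contains name then PySem.Set.add recs name else recs)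
        PySem.Set.empty))
    = ((pvKeys cg).foldl (fun recs name =>
        (pvAdj cg name).foldl (fun recs callee =>
          if PySem.Set.contains ((memoB cg).getD callee []) name then
            PySem.Set.add (PySem.Set.add recs name) callee
          else recs) recs)
        ((pvKeys cg).foldl (fun recs name =>
          if (pvAdj cg name).contains name then PySem.Set.add recs name else recs)
          PySem.Set.empty))
  rw [pass1_eq]
  apply pass2_eq
  · exact fun m hm => hm
  · intro m hm hself
    exact pass1_adds cg (pvKeys cg) PySem.Set.empty m hm hself
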